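-- pv_equiv track=rewrite | github.com/Iskar-Deng/DAM-learning | evaluation/perturb_blimp.py | subtree_span
-- ===== SOURCE A (Python) =====
-- from typing import Dict, List, Tuple, Optional
--
-- def subtree_span(root_id: int, id2tok: Dict[int, dict], children: Dict[int, List[dict]]) -> Tuple[int, int]:
--     stack = [root_id]
--     seen = set()
--     while stack:
--         cur = stack.pop()
--         if cur in seen:
--             continue
--         seen.add(cur)
--         for c in children.get(cur, []):
--             cid = c.get("id")
--             if isinstance(cid, int) and cid not in seen:
--                 stack.append(cid)
--     ids = [i for i in seen if i in id2tok]
--     if not ids: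
--         return root_id, root_id
--     return min(ids), max(ids)
-- ===== SOURCE B (Python) =====
-- from typing import Dict, List, Tuple
--
-- def subtree_span(root_id: int, id2tok: Dict[int, dict], children: Dict[int, List[dict]]) -> Tuple[int, int]:
--     # Round-based fixpoint closure: repeatedly expand the WHOLE current set by one
--     # adjacency step until it stops growing (no stack, no frontier bookkeeping),
--     # then a single accumulator pass extracts the min/max token id.
--     seen = {root_id}
--     while True:
--         grown = set(seen)
--         for u in seen:
--             for c in children.get(u, []):
--                 cid = c.get("id")
--                 if isinstance(cid, int):
--                     grown.add(cid)
--         if len(grown) == len(seen):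
--             break
--         seen = grown
--     lo = hi = None
--     for i in seen:
--         if i in id2tok:
--             if lo is None or i < lo:
--                 lo = i
--             if hi is None or hi < i:
--                 hi = i
--     if lo is None:
--         return root_id, root_id
--     return lo, hi
-- ===== Notes on version B (the rewrite author's own statement) =====
-- stated objective: alternative
-- what changed: Replaces A's explicit one-node-at-a-time DFS stack by a round-based fixpoint closure (expand the whole current set by one adjacency step until it stops growing) and replaces A's filter-list + min()/max() tail by a single accumulator pass tracking lo/hi.
import Mathlib
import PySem

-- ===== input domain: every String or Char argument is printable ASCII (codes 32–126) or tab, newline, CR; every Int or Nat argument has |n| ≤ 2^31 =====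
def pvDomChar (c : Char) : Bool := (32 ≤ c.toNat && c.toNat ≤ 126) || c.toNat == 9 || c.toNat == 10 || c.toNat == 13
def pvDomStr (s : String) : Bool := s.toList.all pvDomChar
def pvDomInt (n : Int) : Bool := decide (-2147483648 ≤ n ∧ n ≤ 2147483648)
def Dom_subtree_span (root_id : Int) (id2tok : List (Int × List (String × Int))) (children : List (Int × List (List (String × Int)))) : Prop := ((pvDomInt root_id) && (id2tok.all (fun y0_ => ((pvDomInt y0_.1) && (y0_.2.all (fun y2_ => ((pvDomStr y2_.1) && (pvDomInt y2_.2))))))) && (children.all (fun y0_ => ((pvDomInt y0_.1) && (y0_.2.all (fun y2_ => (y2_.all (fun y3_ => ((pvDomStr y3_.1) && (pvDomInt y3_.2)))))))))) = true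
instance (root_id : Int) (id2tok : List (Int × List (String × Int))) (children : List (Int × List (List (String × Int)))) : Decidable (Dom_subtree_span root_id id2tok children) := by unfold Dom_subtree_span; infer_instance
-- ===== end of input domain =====

-- B replaces A's one-node-at-a-time explicit DFS stack by a round-based fixpoint closure
-- (grow the whole set by one adjacency step until it stops growing) and replaces A's
-- filter-then-min/max tail by a single accumulator pass (objective: alternative; no speed claim).

-- ===== PORT A =====
-- Python dict arguments arrive as association lists (first match wins)
def pvChildren (children : List (Int × List (List (String × Int)))) (cur : Int) :
    List (List (String × Int)) :=
  PySem.Dict.getD (PySem.Dict.mk children) cur []          -- children.get(cur, [])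

def pvCid (c : List (String × Int)) : Option Int :=
  PySem.Dict.get? (PySem.Dict.mk c) "id"                   -- c.get("id")

-- finite universe of node ids that can ever enter the worklist; used only to size the
-- fuel guard that makes the Lean loops total (the loops provably stop before exhausting it)
def pvUniv (root_id : Int) (children : List (Int × List (List (String × Int)))) : List Int :=
  root_id :: children.flatMap (fun p => p.2.filterMap pvCid)

-- the inner `for c in children.get(cur, [])` push loop of A
-- (the stack is kept top-first: append = cons, pop = head)
def pvPush (seen' : PySem.Set Int) (cs : List (List (String × Int))) (st : List Int) : List Int :=
  cs.foldl (fun st c =>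
    match pvCid c with
    | some cid => if PySem.Set.contains seen' cid then st else cid :: st
    | none => st) st

def pvFuelA (root_id : Int) (children : List (Int × List (List (String × Int)))) : Nat :=
  (pvUniv root_id children).toFinset.card * ((children.map (fun p => p.2.length)).sum + 2) + 2

-- A's `while stack:` loop
def pvLoopA (children : List (Int × List (List (String × Int)))) :
    Nat → PySem.Set Int → List Int → PySem.Set Int
  | 0, seen, _ => seen
  | _ + 1, seen, [] => seen
  | fuel + 1, seen, cur :: rest =>
    if PySem.Set.contains seen cur then pvLoopA children fuel seen rest
    else
      let seen' := PySem.Set.add seen cur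
      pvLoopA children fuel seen' (pvPush seen' (pvChildren children cur) rest)

def subtree_span (root_id : Int) (id2tok : List (Int × List (String × Int)))
    (children : List (Int × List (List (String × Int)))) : Int × Int :=
  let seen := pvLoopA children (pvFuelA root_id children) PySem.Set.empty [root_id]
  let ids := seen.filter (fun i => PySem.Dict.contains (PySem.Dict.mk id2tok) i)
  match PySem.List.min? ids (fun x => x), PySem.List.max? ids (fun x => x) with
  | some mn, some mx => (mn, mx)
  | _, _ => (root_id, root_id)

-- ===== PORT B =====
-- one closure round: grown = set(seen); for u in seen: for c in children.get(u, []): grown.add(c.get("id"))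
def pvGrow (children : List (Int × List (List (String × Int)))) (seen : PySem.Set Int) :
    PySem.Set Int :=
  seen.foldl (fun grown u =>
    (pvChildren children u).foldl (fun grown c =>
      match pvCid c with
      | some cid => PySem.Set.add grown cid
      | none => grown) grown) seen

-- B's `while True: … if len(grown) == len(seen): break` saturation; the Nat fuel only
-- makes the Lean recursion total (the loop provably reaches its fixpoint first)
def pvFix (children : List (Int × List (List (String × Int)))) :
    Nat → PySem.Set Int → PySem.Set Int
  | 0, seen => seen
  | fuel + 1, seen =>
    let grown := pvGrow children seen
    if grown.length = seen.length then seen else pvFix children fuel grown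

-- B's single accumulator pass: running (lo, hi) over the token ids in seen
def pvSpan (id2tok : List (Int × List (String × Int))) (seen : List Int) :
    Option Int × Option Int :=
  seen.foldl (fun acc i =>
    if PySem.Dict.contains (PySem.Dict.mk id2tok) i then
      ((match acc.1 with | none => some i | some lo => if i < lo then some i else some lo),
       (match acc.2 with | none => some i | some hi => if hi < i then some i else some hi))
    else acc) (none, none)

def subtree_span_alt (root_id : Int) (id2tok : List (Int × List (String × Int)))
    (children : List (Int × List (List (String × Int)))) : Int × Int :=
  let seen := pvFix children ((pvUniv root_id children).toFinset.card + 1)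
                (PySem.Set.ofList [root_id])
  match pvSpan id2tok seen with
  | (some lo, hi) => (lo, hi.getD root_id)
  | (none, _) => (root_id, root_id)

-- ===== PRECONDITION & SPEC =====
def Spec_subtree_span (root_id : Int) (id2tok : List (Int × List (String × Int))) (children : List (Int × List (List (String × Int)))) (out : Int × Int) : Prop := out = subtree_span_alt root_id id2tok children
instance (root_id : Int) (id2tok : List (Int × List (String × Int))) (children : List (Int × List (List (String × Int)))) (out : Int × Int) : Decidable (Spec_subtree_span root_id id2tok children out) := by unfold Spec_subtree_span; infer_instance

-- ===== CLAIM (what is proved, stated in full; the proofs are below) =====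
def Claim_equal_subtree_span : Prop := ∀ (root_id : Int) (id2tok : List (Int × List (String × Int))) (children : List (Int × List (List (String × Int)))), Dom_subtree_span root_id id2tok children → Spec_subtree_span root_id id2tok children (subtree_span root_id id2tok children)

-- ===== LEMMAS AND PROOFS =====

-- adjacency: the (unfiltered) child ids of a node, and reachability along it
def pvAdj (children : List (Int × List (List (String × Int)))) (u : Int) : List Int :=
  (pvChildren children u).filterMap pvCid

def PvReach (children : List (Int × List (List (String × Int)))) (root x : Int) : Prop :=
  Relation.ReflTransGen (fun a b => b ∈ pvAdj children a) root x

theorem pvSet_contains_iff {s : PySem.Set Int} {x : Int} :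
    PySem.Set.contains s x = true ↔ x ∈ s := by
  simp [PySem.Set.contains]

theorem pvChildren_cases (children : List (Int × List (List (String × Int)))) (u : Int) :
    pvChildren children u = [] ∨ ∃ p ∈ children, pvChildren children u = p.2 := by
  unfold pvChildren PySem.Dict.getD PySem.Dict.get?
  cases h : List.find? (fun p => p.1 == u) (PySem.Dict.mk children).items with
  | none => left; simp
  | some p =>
    right
    exact ⟨p, List.mem_of_find?_eq_some h, by simp⟩

theorem pvAdj_subset_univ {children : List (Int × List (List (String × Int)))}
    {root u x : Int} (h : x ∈ pvAdj children u) : x ∈ pvUniv root children := by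
  unfold pvAdj at h
  rcases pvChildren_cases children u with hc | ⟨p, hp, hc⟩
  · rw [hc] at h; simp at h
  · rw [hc] at h
    unfold pvUniv
    exact List.mem_cons_of_mem _ (List.mem_flatMap.mpr ⟨p, hp, h⟩)

theorem pvChildren_length_le (children : List (Int × List (List (String × Int)))) (u : Int) :
    (pvChildren children u).length ≤ (children.map (fun p => p.2.length)).sum := by
  rcases pvChildren_cases children u with hc | ⟨p, hp, hc⟩
  · simp [hc]
  · rw [hc]
    exact List.single_le_sum (fun x _ => Nat.zero_le x) _ (List.mem_map.mpr ⟨p, hp, rfl⟩)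

theorem mem_pvPush_of_mem {s : PySem.Set Int} {cs : List (List (String × Int))}
    {st : List Int} {x : Int} (h : x ∈ st) : x ∈ pvPush s cs st := by
  induction cs generalizing st with
  | nil => exact h
  | cons c cs ih =>
    simp only [pvPush, List.foldl_cons] at *
    cases hcc : pvCid c with
    | none => exact ih h
    | some cid =>
      dsimp only
      by_cases hs : PySem.Set.contains s cid = true
      · rw [if_pos hs]; exact ih h
      · rw [if_neg hs]; exact ih (List.mem_cons_of_mem _ h)

theorem mem_pvPush {s : PySem.Set Int} {cs : List (List (String × Int))}
    {st : List Int} {x : Int} (h : x ∈ pvPush s cs st) :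
    x ∈ st ∨ x ∈ cs.filterMap pvCid := by
  induction cs generalizing st with
  | nil => exact Or.inl h
  | cons c cs ih =>
    simp only [pvPush, List.foldl_cons] at h
    cases hc : pvCid c with
    | none =>
      rw [hc] at h
      rcases ih h with h' | h'
      · exact Or.inl h'
      · right; simp [hc, h']
    | some cid =>
      rw [hc] at h
      dsimp only at h
      by_cases hs : PySem.Set.contains s cid = true
      · rw [if_pos hs] at h
        rcases ih h with h' | h'
        · exact Or.inl h'
        · right; simp [hc, h']
      · rw [if_neg hs] at h
        rcases ih h with h' | h'
        · rcases List.mem_cons.mp h' with rfl | h''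
          · right; simp [hc]
          · exact Or.inl h''
        · right; simp [hc, h']

theorem pvPush_covers {s : PySem.Set Int} {cs : List (List (String × Int))}
    {st : List Int} {v : Int} (h : v ∈ cs.filterMap pvCid) :
    v ∈ s ∨ v ∈ pvPush s cs st := by
  induction cs generalizing st with
  | nil => simp at h
  | cons c cs ih =>
    simp only [pvPush, List.foldl_cons]
    cases hc : pvCid c with
    | none =>
      rw [List.filterMap_cons, hc] at h
      exact ih h
    | some cid =>
      simp only [List.filterMap_cons, hc] at h
      dsimp only
      rcases List.mem_cons.mp h with rfl | h'
      · by_cases hs : PySem.Set.contains s v = true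
        · exact Or.inl (pvSet_contains_iff.mp hs)
        · rw [if_neg hs]
          exact Or.inr (mem_pvPush_of_mem List.mem_cons_self)
      · by_cases hs : PySem.Set.contains s cid = true
        · rw [if_pos hs]; exact ih h'
        · rw [if_neg hs]; exact ih h'

theorem length_pvPush (s : PySem.Set Int) (cs : List (List (String × Int))) (st : List Int) :
    (pvPush s cs st).length ≤ st.length + cs.length := by
  induction cs generalizing st with
  | nil => simp [pvPush]
  | cons c cs ihx =>
    have ih := fun st => ihx (st := st)
    simp only [pvPush, List.foldl_cons] at *
    cases hc : pvCid c with
    | none =>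
      calc _ ≤ st.length + cs.length := ih st
        _ ≤ _ := by simp only [List.length_cons]; omega
    | some cid =>
      dsimp only
      by_cases hs : PySem.Set.contains s cid = true
      · rw [if_pos hs]
        calc _ ≤ st.length + cs.length := ih st
          _ ≤ _ := by simp only [List.length_cons]; omega
      · rw [if_neg hs]
        calc _ ≤ (cid :: st).length + cs.length := ih _
          _ ≤ _ := by simp only [List.length_cons]; omega

theorem pvLoopA_spec (children : List (Int × List (List (String × Int)))) (root : Int) :
    ∀ (fuel : Nat) (seen : PySem.Set Int) (stack : List Int),
    (∀ x ∈ stack, x ∈ pvUniv root children) →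
    (∀ u ∈ seen, ∀ v ∈ pvAdj children u, v ∈ seen ∨ v ∈ stack) →
    (∀ x, (x ∈ seen ∨ x ∈ stack) → PvReach children root x) →
    ((pvUniv root children).toFinset \ seen.toFinset).card *
        ((children.map (fun p => p.2.length)).sum + 2) + stack.length < fuel →
    (∀ x, (x ∈ seen ∨ x ∈ stack) → x ∈ pvLoopA children fuel seen stack) ∧
    (∀ u ∈ pvLoopA children fuel seen stack, ∀ v ∈ pvAdj children u,
        v ∈ pvLoopA children fuel seen stack) ∧
    (∀ x ∈ pvLoopA children fuel seen stack, PvReach children root x) := by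
  intro fuel
  induction fuel with
  | zero =>
    intro seen stack _ _ _ hfuel
    omega
  | succ fuel ih =>
    intro seen stack hstU hclo hreach hfuel
    cases stack with
    | nil =>
      simp only [pvLoopA]
      refine ⟨?_, ?_, fun x hx => hreach x (Or.inl hx)⟩
      · intro x hx
        rcases hx with hx | hx
        · exact hx
        · simp at hx
      · intro u hu v hv
        rcases hclo u hu v hv with h | h
        · exact h
        · simp at h
    | cons cur rest =>
      simp only [pvLoopA]
      by_cases hcur : PySem.Set.contains seen cur = true
      · rw [if_pos hcur]
        have hcurmem : cur ∈ seen := pvSet_contains_iff.mp hcur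
        have h4 : ((pvUniv root children).toFinset \ seen.toFinset).card *
            ((children.map (fun p => p.2.length)).sum + 2) + rest.length < fuel := by
          revert hfuel
          generalize ((pvUniv root children).toFinset \ seen.toFinset).card *
            ((children.map (fun p => p.2.length)).sum + 2) = M
          simp only [List.length_cons]
          omega
        obtain ⟨i1, i2, i3⟩ := ih seen rest
          (fun x hx => hstU x (List.mem_cons_of_mem _ hx))
          (by
            intro u hu v hv
            rcases hclo u hu v hv with h | h
            · exact Or.inl h
            · rcases List.mem_cons.mp h with rfl | h'
              · exact Or.inl hcurmem
              · exact Or.inr h')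
          (by
            intro x hx
            rcases hx with hx | hx
            · exact hreach x (Or.inl hx)
            · exact hreach x (Or.inr (List.mem_cons_of_mem _ hx)))
          h4
        refine ⟨?_, i2, i3⟩
        intro x hx
        rcases hx with hx | hx
        · exact i1 x (Or.inl hx)
        · rcases List.mem_cons.mp hx with rfl | hx'
          · exact i1 x (Or.inl hcurmem)
          · exact i1 x (Or.inr hx')
      · rw [if_neg hcur]
        have hcurnot : cur ∉ seen := fun hm => hcur (pvSet_contains_iff.mpr hm)
        have hcurU : cur ∈ pvUniv root children := hstU cur List.mem_cons_self
        show _ ∧ _ ∧ _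
        have hmemadd : ∀ y, y ∈ PySem.Set.add seen cur ↔ y ∈ seen ∨ y = cur :=
          PySem.Set.mem_add seen cur
        have hstU' : ∀ x ∈ pvPush (PySem.Set.add seen cur) (pvChildren children cur) rest,
            x ∈ pvUniv root children := by
          intro x hx
          rcases mem_pvPush hx with hx' | hx'
          · exact hstU x (List.mem_cons_of_mem _ hx')
          · exact pvAdj_subset_univ (u := cur) hx'
        have hclo' : ∀ u ∈ PySem.Set.add seen cur, ∀ v ∈ pvAdj children u,
            v ∈ PySem.Set.add seen cur ∨
              v ∈ pvPush (PySem.Set.add seen cur) (pvChildren children cur) rest := by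
          intro u hu v hv
          rcases (hmemadd u).mp hu with hu' | rfl
          · rcases hclo u hu' v hv with h | h
            · exact Or.inl ((hmemadd v).mpr (Or.inl h))
            · rcases List.mem_cons.mp h with rfl | h'
              · exact Or.inl ((hmemadd v).mpr (Or.inr rfl))
              · exact Or.inr (mem_pvPush_of_mem h')
          · exact pvPush_covers hv
        have hreach' : ∀ x, (x ∈ PySem.Set.add seen cur ∨
            x ∈ pvPush (PySem.Set.add seen cur) (pvChildren children cur) rest) →
            PvReach children root x := by
          intro x hx
          rcases hx with hx | hx
          · rcases (hmemadd x).mp hx with hx' | rfl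
            · exact hreach x (Or.inl hx')
            · exact hreach x (Or.inr List.mem_cons_self)
          · rcases mem_pvPush hx with hx' | hx'
            · exact hreach x (Or.inr (List.mem_cons_of_mem _ hx'))
            · exact Relation.ReflTransGen.tail
                (hreach cur (Or.inr List.mem_cons_self)) hx'
        have hf4 : ((pvUniv root children).toFinset \ (PySem.Set.add seen cur).toFinset).card *
            ((children.map (fun p => p.2.length)).sum + 2) +
            (pvPush (PySem.Set.add seen cur) (pvChildren children cur) rest).length < fuel := by
          have hcne : cur ∈ (pvUniv root children).toFinset \ seen.toFinset :=
            Finset.mem_sdiff.mpr ⟨List.mem_toFinset.mpr hcurU,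
              fun hh => hcurnot (List.mem_toFinset.mp hh)⟩
          have hsub : (pvUniv root children).toFinset \ (PySem.Set.add seen cur).toFinset ⊆
              ((pvUniv root children).toFinset \ seen.toFinset).erase cur := by
            intro y hy
            rw [Finset.mem_sdiff] at hy
            rw [Finset.mem_erase, Finset.mem_sdiff]
            have hy2 : y ∉ seen ∧ y ≠ cur := by
              constructor
              · intro hmem
                exact hy.2 (List.mem_toFinset.mpr ((hmemadd y).mpr (Or.inl hmem)))
              · intro hmem
                exact hy.2 (List.mem_toFinset.mpr ((hmemadd y).mpr (Or.inr hmem)))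
            exact ⟨hy2.2, hy.1, fun hh => hy2.1 (List.mem_toFinset.mp hh)⟩
          have hcard : ((pvUniv root children).toFinset \ (PySem.Set.add seen cur).toFinset).card ≤
              ((pvUniv root children).toFinset \ seen.toFinset).card - 1 := by
            calc _ ≤ (((pvUniv root children).toFinset \ seen.toFinset).erase cur).card :=
                  Finset.card_le_card hsub
              _ = _ := Finset.card_erase_of_mem hcne
          have hcpos : 0 < ((pvUniv root children).toFinset \ seen.toFinset).card :=
            Finset.card_pos.mpr ⟨cur, hcne⟩
          have hlen : (pvPush (PySem.Set.add seen cur) (pvChildren children cur) rest).length ≤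
              rest.length + (children.map (fun p => p.2.length)).sum := by
            have h1 := length_pvPush (PySem.Set.add seen cur) (pvChildren children cur) rest
            have h2 := pvChildren_length_le children cur
            omega
          have hmul : ((pvUniv root children).toFinset \ (PySem.Set.add seen cur).toFinset).card *
              ((children.map (fun p => p.2.length)).sum + 2) ≤
              (((pvUniv root children).toFinset \ seen.toFinset).card - 1) *
              ((children.map (fun p => p.2.length)).sum + 2) :=
            Nat.mul_le_mul_right _ hcard
          have hBC : (((pvUniv root children).toFinset \ seen.toFinset).card - 1) *
              ((children.map (fun p => p.2.length)).sum + 2) =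
              ((pvUniv root children).toFinset \ seen.toFinset).card *
              ((children.map (fun p => p.2.length)).sum + 2) -
              ((children.map (fun p => p.2.length)).sum + 2) := by
            rw [Nat.sub_mul, Nat.one_mul]
          have hClow : ((children.map (fun p => p.2.length)).sum + 2) ≤
              ((pvUniv root children).toFinset \ seen.toFinset).card *
              ((children.map (fun p => p.2.length)).sum + 2) := by
            calc _ = 1 * ((children.map (fun p => p.2.length)).sum + 2) := (Nat.one_mul _).symm
              _ ≤ _ := Nat.mul_le_mul_right _ hcpos
          simp only [List.length_cons] at hfuel
          obtain ⟨A, hA⟩ : ∃ a, ((pvUniv root children).toFinset \ (PySem.Set.add seen cur).toFinset).card *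
              ((children.map (fun p => p.2.length)).sum + 2) = a := ⟨_, rfl⟩
          obtain ⟨B, hB⟩ : ∃ b, (((pvUniv root children).toFinset \ seen.toFinset).card - 1) *
              ((children.map (fun p => p.2.length)).sum + 2) = b := ⟨_, rfl⟩
          obtain ⟨C, hC⟩ : ∃ c, ((pvUniv root children).toFinset \ seen.toFinset).card *
              ((children.map (fun p => p.2.length)).sum + 2) = c := ⟨_, rfl⟩
          rw [hA, hB] at hmul
          rw [hB, hC] at hBC
          rw [hC] at hClow hfuel
          rw [hA]
          omega
        obtain ⟨i1, i2, i3⟩ := ih (PySem.Set.add seen cur)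
          (pvPush (PySem.Set.add seen cur) (pvChildren children cur) rest)
          hstU' hclo' hreach' hf4
        refine ⟨?_, i2, i3⟩
        intro x hx
        rcases hx with hx | hx
        · exact i1 x (Or.inl ((hmemadd x).mpr (Or.inl hx)))
        · rcases List.mem_cons.mp hx with rfl | hx'
          · exact i1 x (Or.inl ((hmemadd x).mpr (Or.inr rfl)))
          · exact i1 x (Or.inr (mem_pvPush_of_mem hx'))

theorem memA_iff (children : List (Int × List (List (String × Int)))) (root x : Int) :
    x ∈ pvLoopA children (pvFuelA root children) PySem.Set.empty [root] ↔
      PvReach children root x := by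
  obtain ⟨i1, i2, i3⟩ := pvLoopA_spec children root (pvFuelA root children)
    PySem.Set.empty [root]
    (by intro y hy; rcases List.mem_cons.mp hy with rfl | hy'
        · exact List.mem_cons_self
        · simp at hy')
    (by intro u hu; simp [PySem.Set.empty] at hu)
    (by intro y hy
        rcases hy with hy | hy
        · simp [PySem.Set.empty] at hy
        · rcases List.mem_cons.mp hy with rfl | hy'
          · exact Relation.ReflTransGen.refl
          · simp at hy')
    (by simp only [pvFuelA, PySem.Set.empty, List.toFinset_nil, Finset.sdiff_empty,
          List.length_cons, List.length_nil]
        exact Nat.lt_succ_self _)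
  constructor
  · exact i3 x
  · intro h
    induction h with
    | refl => exact i1 root (Or.inr List.mem_cons_self)
    | tail _ hbc ihx => exact i2 _ ihx _ hbc

-- ===== B-side lemmas =====

theorem mem_pvGrow {children : List (Int × List (List (String × Int)))}
    {seen : PySem.Set Int} {x : Int} :
    x ∈ pvGrow children seen ↔ x ∈ seen ∨ ∃ u ∈ seen, x ∈ pvAdj children u := by
  unfold pvGrow
  have inner : ∀ (u : Int) (cs : List (List (String × Int))) (g : PySem.Set Int),
      x ∈ cs.foldl (fun g c =>
        match pvCid c with
        | some cid => PySem.Set.add g cid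
        | none => g) g ↔ x ∈ g ∨ x ∈ cs.filterMap pvCid := by
    intro u cs
    induction cs with
    | nil => simp
    | cons c cs ih =>
      intro g
      simp only [List.foldl_cons]
      cases hc : pvCid c with
      | none => rw [ih]; simp [hc]
      | some cid =>
        rw [ih]
        simp [hc, PySem.Set.mem_add]
        tauto
  have outer : ∀ (l : List Int) (g : PySem.Set Int),
      x ∈ l.foldl (fun g u =>
        (pvChildren children u).foldl (fun g c =>
          match pvCid c with
          | some cid => PySem.Set.add g cid
          | none => g) g) g ↔ x ∈ g ∨ ∃ u ∈ l, x ∈ pvAdj children u := by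
    intro l
    induction l with
    | nil => simp
    | cons u l ih =>
      intro g
      simp only [List.foldl_cons]
      rw [ih, inner u]
      unfold pvAdj
      constructor
      · rintro ((h | h) | ⟨w, hw, hx⟩)
        · exact Or.inl h
        · exact Or.inr ⟨u, List.mem_cons_self, h⟩
        · exact Or.inr ⟨w, List.mem_cons_of_mem _ hw, hx⟩
      · rintro (h | ⟨w, hw, hx⟩)
        · exact Or.inl (Or.inl h)
        · rcases List.mem_cons.mp hw with rfl | hw'
          · exact Or.inl (Or.inr hx)
          · exact Or.inr ⟨w, hw', hx⟩
  exact outer seen seen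

theorem nodup_pvGrow {children : List (Int × List (List (String × Int)))}
    {seen : PySem.Set Int} (h : seen.Nodup) : (pvGrow children seen).Nodup := by
  unfold pvGrow
  have inner : ∀ (cs : List (List (String × Int))) (g : PySem.Set Int), g.Nodup →
      (cs.foldl (fun g c =>
        match pvCid c with
        | some cid => PySem.Set.add g cid
        | none => g) g).Nodup := by
    intro cs
    induction cs with
    | nil => intro g hg; exact hg
    | cons c cs ih =>
      intro g hg
      simp only [List.foldl_cons]
      cases hc : pvCid c with
      | none => exact ih g hg
      | some cid => exact ih _ (PySem.Set.nodup_add g cid hg)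
  have outer : ∀ (l : List Int) (g : PySem.Set Int), g.Nodup →
      (l.foldl (fun g u =>
        (pvChildren children u).foldl (fun g c =>
          match pvCid c with
          | some cid => PySem.Set.add g cid
          | none => g) g) g).Nodup := by
    intro l
    induction l with
    | nil => intro g hg; exact hg
    | cons u l ih =>
      intro g hg
      simp only [List.foldl_cons]
      exact ih _ (inner _ g hg)
  exact outer seen seen h


theorem pvFix_spec (children : List (Int × List (List (String × Int)))) (root : Int) :
    ∀ (fuel : Nat) (seen : PySem.Set Int),
    seen.Nodup →
    (∀ x ∈ seen, x ∈ pvUniv root children) →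
    (∀ x ∈ seen, PvReach children root x) →
    (pvUniv root children).toFinset.card < fuel + seen.toFinset.card →
    (∀ x ∈ pvFix children fuel seen, PvReach children root x) ∧
    (∀ x ∈ seen, x ∈ pvFix children fuel seen) ∧
    (∀ u ∈ pvFix children fuel seen, ∀ v ∈ pvAdj children u, v ∈ pvFix children fuel seen) := by
  intro fuel
  induction fuel with
  | zero =>
    intro seen hnd hsub _ hfuel
    exfalso
    have hle : seen.toFinset.card ≤ (pvUniv root children).toFinset.card :=
      Finset.card_le_card (fun y hy =>
        List.mem_toFinset.mpr (hsub y (List.mem_toFinset.mp hy)))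
    omega
  | succ fuel ih =>
    intro seen hnd hsub hreach hfuel
    simp only [pvFix]
    have hgrow := fun x => mem_pvGrow (children := children) (seen := seen) (x := x)
    have hglen : (pvGrow children seen).Nodup := nodup_pvGrow hnd
    have hmono : ∀ x ∈ seen, x ∈ pvGrow children seen :=
      fun x hx => (hgrow x).mpr (Or.inl hx)
    have hfsub : seen.toFinset ⊆ (pvGrow children seen).toFinset := fun y hy =>
      List.mem_toFinset.mpr (hmono y (List.mem_toFinset.mp hy))
    have hclen : seen.toFinset.card = seen.length := List.toFinset_card_of_nodup hnd
    have hglen' : (pvGrow children seen).toFinset.card = (pvGrow children seen).length :=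
      List.toFinset_card_of_nodup hglen
    by_cases hlen : (pvGrow children seen).length = seen.length
    · rw [if_pos hlen]
      have heq : seen.toFinset = (pvGrow children seen).toFinset :=
        Finset.eq_of_subset_of_card_le hfsub (by omega)
      refine ⟨hreach, fun x hx => hx, ?_⟩
      intro u hu v hv
      have hvg : v ∈ pvGrow children seen := (hgrow v).mpr (Or.inr ⟨u, hu, hv⟩)
      have : v ∈ seen.toFinset := heq ▸ List.mem_toFinset.mpr hvg
      exact List.mem_toFinset.mp this
    · rw [if_neg hlen]
      have hsub' : ∀ x ∈ pvGrow children seen, x ∈ pvUniv root children := by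
        intro x hx
        rcases (hgrow x).mp hx with hx' | ⟨u, _, hadj⟩
        · exact hsub x hx'
        · exact pvAdj_subset_univ hadj
      have hreach' : ∀ x ∈ pvGrow children seen, PvReach children root x := by
        intro x hx
        rcases (hgrow x).mp hx with hx' | ⟨u, hu, hadj⟩
        · exact hreach x hx'
        · exact Relation.ReflTransGen.tail (hreach u hu) hadj
      have hcard : seen.toFinset.card ≤ (pvGrow children seen).toFinset.card :=
        Finset.card_le_card hfsub
      have hfuel' : (pvUniv root children).toFinset.card <
          fuel + (pvGrow children seen).toFinset.card := by omega
      obtain ⟨i1, i2, i3⟩ := ih (pvGrow children seen) hglen hsub' hreach' hfuel'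
      exact ⟨i1, fun x hx => i2 x (hmono x hx), i3⟩

theorem memB_iff (children : List (Int × List (List (String × Int)))) (root x : Int) :
    x ∈ pvFix children ((pvUniv root children).toFinset.card + 1)
        (PySem.Set.ofList [root]) ↔ PvReach children root x := by
  have hmem0 : ∀ y, y ∈ PySem.Set.ofList [root] ↔ y = root := by
    intro y
    rw [PySem.Set.mem_ofList]
    simp
  obtain ⟨i1, i2, i3⟩ := pvFix_spec children root ((pvUniv root children).toFinset.card + 1)
    (PySem.Set.ofList [root])
    (PySem.Set.nodup_ofList _)
    (by intro y hy; rw [hmem0 y] at hy; subst hy; exact List.mem_cons_self)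
    (by intro y hy; rw [hmem0 y] at hy; subst hy; exact Relation.ReflTransGen.refl)
    (by omega)
  constructor
  · exact i1 x
  · intro h
    induction h with
    | refl => exact i2 root ((hmem0 root).mpr rfl)
    | tail _ hbc ihx => exact i3 _ ihx _ hbc

-- the token test and the two components of B's accumulator step, for splitting pvSpan
def pvTok (id2tok : List (Int × List (String × Int))) (i : Int) : Bool :=
  PySem.Dict.contains (PySem.Dict.mk id2tok) i

def pvLoStep (id2tok : List (Int × List (String × Int))) (acc : Option Int) (i : Int) :
    Option Int :=
  if pvTok id2tok i then
    (match acc with | none => some i | some lo => if i < lo then some i else some lo)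
  else acc

def pvHiStep (id2tok : List (Int × List (String × Int))) (acc : Option Int) (i : Int) :
    Option Int :=
  if pvTok id2tok i then
    (match acc with | none => some i | some hi => if hi < i then some i else some hi)
  else acc

theorem pvSpan_split (id2tok : List (Int × List (String × Int))) (l : List Int) :
    ∀ (lo hi : Option Int),
    l.foldl (fun acc i =>
      if PySem.Dict.contains (PySem.Dict.mk id2tok) i then
        ((match acc.1 with | none => some i | some lo => if i < lo then some i else some lo),
         (match acc.2 with | none => some i | some hi => if hi < i then some i else some hi))
      else acc) (lo, hi) =
    (l.foldl (pvLoStep id2tok) lo, l.foldl (pvHiStep id2tok) hi) := by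
  induction l with
  | nil => intro lo hi; rfl
  | cons i l ih =>
    intro lo hi
    simp only [List.foldl_cons]
    by_cases hc : pvTok id2tok i = true
    · have hc' : PySem.Dict.contains (PySem.Dict.mk id2tok) i = true := hc
      rw [if_pos hc']
      rw [ih]
      simp only [pvLoStep, pvHiStep, if_pos hc]
    · have hc' : ¬ PySem.Dict.contains (PySem.Dict.mk id2tok) i = true := hc
      rw [if_neg hc']
      rw [ih]
      simp only [pvLoStep, pvHiStep, if_neg hc]

theorem pvSpan_eq (id2tok : List (Int × List (String × Int))) (l : List Int) :
    pvSpan id2tok l = (l.foldl (pvLoStep id2tok) none, l.foldl (pvHiStep id2tok) none) := by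
  unfold pvSpan
  exact pvSpan_split id2tok l none none

theorem pvLo_inv (id2tok : List (Int × List (String × Int))) :
    ∀ (l : List Int) (acc : Option Int),
    (l.foldl (pvLoStep id2tok) acc = none → acc = none ∧ l.filter (pvTok id2tok) = []) ∧
    (∀ m, l.foldl (pvLoStep id2tok) acc = some m →
      (m ∈ l.filter (pvTok id2tok) ∨ acc = some m) ∧
      (∀ y ∈ l.filter (pvTok id2tok), m ≤ y) ∧
      (∀ a, acc = some a → m ≤ a)) := by
  intro l
  induction l with
  | nil =>
    intro acc
    refine ⟨fun h => ⟨h, rfl⟩, fun m h => ⟨Or.inr h, by simp, ?_⟩⟩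
    intro a ha
    simp only [List.foldl_nil] at h
    rw [h] at ha
    injection ha with ha'
    omega
  | cons i l ih =>
    intro acc
    by_cases hc : pvTok id2tok i = true
    · have hstep : ∃ v, pvLoStep id2tok acc i = some v ∧ v ≤ i ∧
          (∀ a, acc = some a → v ≤ a) ∧ (v = i ∨ acc = some v) := by
        cases acc with
        | none => exact ⟨i, by simp [pvLoStep, hc], le_refl i, by simp, Or.inl rfl⟩
        | some lo =>
          by_cases hlt : i < lo
          · exact ⟨i, by simp [pvLoStep, hc, hlt], le_refl i,
              fun a ha => by injection ha with ha'; omega, Or.inl rfl⟩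
          · refine ⟨lo, by simp [pvLoStep, hc, hlt], by omega,
              fun a ha => by injection ha with ha'; omega, Or.inr rfl⟩
      obtain ⟨v, hv, hvi, hva, hvor⟩ := hstep
      have hfil : (i :: l).filter (pvTok id2tok) = i :: l.filter (pvTok id2tok) := by
        simp [hc]
      constructor
      · intro h
        simp only [List.foldl_cons] at h
        obtain ⟨h1, _⟩ := (ih (pvLoStep id2tok acc i)).1 h
        rw [hv] at h1
        exact absurd h1 (by simp)
      · intro m h
        simp only [List.foldl_cons] at h
        obtain ⟨hmem, hle, hacc⟩ := (ih (pvLoStep id2tok acc i)).2 m h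
        have hmv : m ≤ v := hacc v hv
        rw [hfil]
        refine ⟨?_, ?_, ?_⟩
        · rcases hmem with hmem | hmem
          · exact Or.inl (List.mem_cons_of_mem _ hmem)
          · rw [hv] at hmem
            injection hmem with hmem'
            subst hmem'
            rcases hvor with rfl | hvor
            · exact Or.inl List.mem_cons_self
            · exact Or.inr hvor
        · intro y hy
          rcases List.mem_cons.mp hy with rfl | hy'
          · omega
          · exact hle y hy'
        · intro a ha
          have := hva a ha
          omega
    · have hstep : pvLoStep id2tok acc i = acc := by simp [pvLoStep, hc]
      have hfil : (i :: l).filter (pvTok id2tok) = l.filter (pvTok id2tok) := by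
        simp [hc]
      constructor
      · intro h
        simp only [List.foldl_cons, hstep] at h
        obtain ⟨h1, h2⟩ := (ih acc).1 h
        exact ⟨h1, by rw [hfil]; exact h2⟩
      · intro m h
        simp only [List.foldl_cons, hstep] at h
        obtain ⟨hmem, hle, hacc⟩ := (ih acc).2 m h
        rw [hfil]
        exact ⟨hmem, hle, hacc⟩

theorem pvHi_inv (id2tok : List (Int × List (String × Int))) :
    ∀ (l : List Int) (acc : Option Int),
    (l.foldl (pvHiStep id2tok) acc = none → acc = none ∧ l.filter (pvTok id2tok) = []) ∧
    (∀ m, l.foldl (pvHiStep id2tok) acc = some m →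
      (m ∈ l.filter (pvTok id2tok) ∨ acc = some m) ∧
      (∀ y ∈ l.filter (pvTok id2tok), y ≤ m) ∧
      (∀ a, acc = some a → a ≤ m)) := by
  intro l
  induction l with
  | nil =>
    intro acc
    refine ⟨fun h => ⟨h, rfl⟩, fun m h => ⟨Or.inr h, by simp, ?_⟩⟩
    intro a ha
    simp only [List.foldl_nil] at h
    rw [h] at ha
    injection ha with ha'
    omega
  | cons i l ih =>
    intro acc
    by_cases hc : pvTok id2tok i = true
    · have hstep : ∃ v, pvHiStep id2tok acc i = some v ∧ i ≤ v ∧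
          (∀ a, acc = some a → a ≤ v) ∧ (v = i ∨ acc = some v) := by
        cases acc with
        | none => exact ⟨i, by simp [pvHiStep, hc], le_refl i, by simp, Or.inl rfl⟩
        | some hi =>
          by_cases hlt : hi < i
          · exact ⟨i, by simp [pvHiStep, hc, hlt], le_refl i,
              fun a ha => by injection ha with ha'; omega, Or.inl rfl⟩
          · refine ⟨hi, by simp [pvHiStep, hc, hlt], by omega,
              fun a ha => by injection ha with ha'; omega, Or.inr rfl⟩
      obtain ⟨v, hv, hvi, hva, hvor⟩ := hstep
      have hfil : (i :: l).filter (pvTok id2tok) = i :: l.filter (pvTok id2tok) := by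
        simp [hc]
      constructor
      · intro h
        simp only [List.foldl_cons] at h
        obtain ⟨h1, _⟩ := (ih (pvHiStep id2tok acc i)).1 h
        rw [hv] at h1
        exact absurd h1 (by simp)
      · intro m h
        simp only [List.foldl_cons] at h
        obtain ⟨hmem, hle, hacc⟩ := (ih (pvHiStep id2tok acc i)).2 m h
        have hmv : v ≤ m := hacc v hv
        rw [hfil]
        refine ⟨?_, ?_, ?_⟩
        · rcases hmem with hmem | hmem
          · exact Or.inl (List.mem_cons_of_mem _ hmem)
          · rw [hv] at hmem
            injection hmem with hmem'
            subst hmem'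
            rcases hvor with rfl | hvor
            · exact Or.inl List.mem_cons_self
            · exact Or.inr hvor
        · intro y hy
          rcases List.mem_cons.mp hy with rfl | hy'
          · omega
          · exact hle y hy'
        · intro a ha
          have := hva a ha
          omega
    · have hstep : pvHiStep id2tok acc i = acc := by simp [pvHiStep, hc]
      have hfil : (i :: l).filter (pvTok id2tok) = l.filter (pvTok id2tok) := by
        simp [hc]
      constructor
      · intro h
        simp only [List.foldl_cons, hstep] at h
        obtain ⟨h1, h2⟩ := (ih acc).1 h
        exact ⟨h1, by rw [hfil]; exact h2⟩
      · intro m h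
        simp only [List.foldl_cons, hstep] at h
        obtain ⟨hmem, hle, hacc⟩ := (ih acc).2 m h
        rw [hfil]
        exact ⟨hmem, hle, hacc⟩

-- ===== VERDICT (by name: the statement is the Claim_ definition above) =====
theorem subtree_span_spec : Claim_equal_subtree_span := by
  intro root_id id2tok children _
  unfold Spec_subtree_span
  simp only [subtree_span, subtree_span_alt]
  rw [pvSpan_eq]
  have hfA : (pvLoopA children (pvFuelA root_id children) PySem.Set.empty
      [root_id]).filter (fun i => PySem.Dict.contains (PySem.Dict.mk id2tok) i) =
      (pvLoopA children (pvFuelA root_id children) PySem.Set.empty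
      [root_id]).filter (pvTok id2tok) := rfl
  rw [hfA]
  have hmemf : ∀ x,
      x ∈ (pvLoopA children (pvFuelA root_id children) PySem.Set.empty
        [root_id]).filter (pvTok id2tok) ↔
      x ∈ (pvFix children ((pvUniv root_id children).toFinset.card + 1)
        (PySem.Set.ofList [root_id])).filter (pvTok id2tok) := by
    intro x
    simp only [List.mem_filter]
    rw [memA_iff, memB_iff]
  cases hlo : (pvFix children ((pvUniv root_id children).toFinset.card + 1)
      (PySem.Set.ofList [root_id])).foldl (pvLoStep id2tok) none with
  | none =>
    obtain ⟨_, hnilB⟩ := (pvLo_inv id2tok _ none).1 hlo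
    have hnilA : (pvLoopA children (pvFuelA root_id children) PySem.Set.empty
        [root_id]).filter (pvTok id2tok) = [] := by
      rw [List.eq_nil_iff_forall_not_mem]
      intro x hx
      have := (hmemf x).mp hx
      rw [hnilB] at this
      simp at this
    rw [hnilA]
    rw [show PySem.List.min? ([] : List Int) (fun x => x) = none from
        (PySem.List.min?_eq_none_iff _ _).mpr rfl,
      show PySem.List.max? ([] : List Int) (fun x => x) = none from
        (PySem.List.max?_eq_none_iff _ _).mpr rfl]
  | some m =>
    obtain ⟨hmmem, hmle, _⟩ := (pvLo_inv id2tok _ none).2 m hlo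
    have hmB : m ∈ (pvFix children ((pvUniv root_id children).toFinset.card + 1)
        (PySem.Set.ofList [root_id])).filter (pvTok id2tok) := by
      rcases hmmem with h | h
      · exact h
      · exact absurd h (by simp)
    cases hhi : (pvFix children ((pvUniv root_id children).toFinset.card + 1)
        (PySem.Set.ofList [root_id])).foldl (pvHiStep id2tok) none with
    | none =>
      obtain ⟨_, hnilB⟩ := (pvHi_inv id2tok _ none).1 hhi
      rw [hnilB] at hmB
      simp at hmB
    | some M =>
      obtain ⟨hMmem, hMge, _⟩ := (pvHi_inv id2tok _ none).2 M hhi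
      have hMB : M ∈ (pvFix children ((pvUniv root_id children).toFinset.card + 1)
          (PySem.Set.ofList [root_id])).filter (pvTok id2tok) := by
        rcases hMmem with h | h
        · exact h
        · exact absurd h (by simp)
      have hmA : m ∈ (pvLoopA children (pvFuelA root_id children) PySem.Set.empty
          [root_id]).filter (pvTok id2tok) := (hmemf m).mpr hmB
      have hMA : M ∈ (pvLoopA children (pvFuelA root_id children) PySem.Set.empty
          [root_id]).filter (pvTok id2tok) := (hmemf M).mpr hMB
      obtain ⟨m', hm'⟩ : ∃ m', PySem.List.min? ((pvLoopA children (pvFuelA root_id children)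
          PySem.Set.empty [root_id]).filter (pvTok id2tok)) (fun x => x) = some m' := by
        cases hcc : PySem.List.min? ((pvLoopA children (pvFuelA root_id children)
            PySem.Set.empty [root_id]).filter (pvTok id2tok)) (fun x => x) with
        | none =>
          rw [PySem.List.min?_eq_none_iff] at hcc
          rw [hcc] at hmA
          simp at hmA
        | some m' => exact ⟨m', rfl⟩
      obtain ⟨M', hM'⟩ : ∃ M', PySem.List.max? ((pvLoopA children (pvFuelA root_id children)
          PySem.Set.empty [root_id]).filter (pvTok id2tok)) (fun x => x) = some M' := by
        cases hcc : PySem.List.max? ((pvLoopA children (pvFuelA root_id children)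
            PySem.Set.empty [root_id]).filter (pvTok id2tok)) (fun x => x) with
        | none =>
          rw [PySem.List.max?_eq_none_iff] at hcc
          rw [hcc] at hmA
          simp at hmA
        | some M' => exact ⟨M', rfl⟩
      have hmeq : m' = m := by
        have h1 : m' ≤ m := PySem.List.min?_isMin hm' m hmA
        have h2 : m ≤ m' := hmle m' ((hmemf m').mp (PySem.List.min?_mem hm'))
        omega
      have hMeq : M' = M := by
        have h1 : M ≤ M' := PySem.List.max?_isMax hM' M hMA
        have h2 : M' ≤ M := hMge M' ((hmemf M').mp (PySem.List.max?_mem hM'))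
        omega
      rw [hm', hM', hmeq, hMeq]
      rfl
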